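-- pv_equiv track=rewrite | github.com/Hotsumm/BOJ-Programmers-Solution | Programmers/KaKao/2018캐시.py | solution
-- ===== SOURCE A (Python) =====
-- def solution(cacheSize, cities):
--     answer = 0
--     cache = []
--     if cacheSize == 0:
--         return len(cities)*5
--
--     for city in cities:
--         if city.lower() not in cache:
--             answer += 5
--             if len(cache) < cacheSize :
--                 cache.append(city.lower())
--             else :
--                 cache.pop(0)
--                 cache.append(city.lower())
--         else :
--             answer += 1
--             cache.pop(cache.index(city.lower()))
--             cache.append(city.lower())
--
--     return answer
-- ===== SOURCE B (Python) =====
-- def solution(cacheSize, cities):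
--     # LRU stack-distance formulation: an access is a hit (cost 1) iff the city was
--     # seen before and the number of distinct cities accessed since its previous
--     # occurrence is smaller than cacheSize; otherwise it costs 5.  No cache is simulated.
--     seq = [city.lower() for city in cities]
--     last = {}
--     total = 0
--     for i, c in enumerate(seq):
--         if c in last and len(set(seq[last[c] + 1:i])) < cacheSize:
--             total += 1
--         else:
--             total += 5
--         last[c] = i
--     return total
-- ===== Notes on version B (the rewrite author's own statement) =====
-- stated objective: alternative
-- what changed: Replaces A's explicit LRU-cache simulation (a list with move-to-back hits and pop-front eviction) by the LRU stack-distance characterisation: each access is a hit iff the number of distinct cities seen since its previous occurrence is below cacheSize, computed from a last-occurrence index map; no cache state is maintained.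
import Mathlib
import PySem

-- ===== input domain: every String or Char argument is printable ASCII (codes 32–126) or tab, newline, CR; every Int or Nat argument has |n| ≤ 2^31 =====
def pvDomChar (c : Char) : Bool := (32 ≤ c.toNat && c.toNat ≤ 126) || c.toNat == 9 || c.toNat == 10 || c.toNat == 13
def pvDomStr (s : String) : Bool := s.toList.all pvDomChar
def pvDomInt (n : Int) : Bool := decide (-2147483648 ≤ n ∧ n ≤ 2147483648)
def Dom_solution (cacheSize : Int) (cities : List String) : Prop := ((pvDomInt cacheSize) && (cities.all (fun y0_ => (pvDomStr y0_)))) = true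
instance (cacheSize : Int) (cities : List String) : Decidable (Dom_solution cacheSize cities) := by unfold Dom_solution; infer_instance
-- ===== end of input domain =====

-- B replaces A's explicit LRU-cache simulation (list with move-to-back hits and pop-front
-- eviction) by the LRU stack-distance rule: an access is a hit iff the number of distinct
-- cities seen since its previous occurrence is below cacheSize (objective: alternative algorithm).


-- ===== PORT A =====
-- one iteration of A's for-loop: state = (answer, cache list)
def stepA (cacheSize : Int) (st : Int × List String) (city : String) : Int × List String :=
  let c := PySem.Str.lower city
  if ¬ st.2.contains c then
    if (st.2.length : Int) < cacheSize then (st.1 + 5, st.2 ++ [c])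
    else
      -- cache.pop(0); cache.append(c)  (pop? none = Python IndexError, excluded by Pre_)
      match PySem.List.pop? st.2 0 with
      | some (_, rest) => (st.1 + 5, rest ++ [c])
      | none => (st.1 + 5, st.2 ++ [c])
  else
    -- cache.pop(cache.index(c)); cache.append(c)  (index?/pop? are some in this branch)
    match PySem.List.index? st.2 c with
    | some i =>
      match PySem.List.pop? st.2 (i : Int) with
      | some (_, rest) => (st.1 + 1, rest ++ [c])
      | none => (st.1 + 1, st.2 ++ [c])
    | none => (st.1 + 1, st.2 ++ [c])

def solution (cacheSize : Int) (cities : List String) : Int :=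
  if cacheSize == 0 then (cities.length : Int) * 5
  else (cities.foldl (stepA cacheSize) (0, [])).1

-- ===== PORT B =====
-- one iteration of B's for-loop over enumerate(seq): state = (total, last-occurrence dict);
-- hit test: c seen before and len(set(seq[last[c]+1:i])) < cacheSize
def stepB (cacheSize : Int) (seq : List String) (st : Int × PySem.Dict String Int) (p : Int × String) : Int × PySem.Dict String Int :=
  let total :=
    match st.2.get? p.2 with
    | some j =>
      if ((PySem.Set.ofList (PySem.List.slice seq (some (j + 1)) (some p.1))).length : Int) < cacheSize
      then st.1 + 1 else st.1 + 5
    | none => st.1 + 5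
  (total, st.2.insert p.2 p.1)

def solution_alt (cacheSize : Int) (cities : List String) : Int :=
  let seq := cities.map PySem.Str.lower
  ((PySem.List.enumerate seq 0).foldl (stepB cacheSize seq) (0, PySem.Dict.empty)).1

-- ===== PRECONDITION & SPEC =====
-- Pre_ excludes cacheSize < 0 with a nonempty cities list: there A raises IndexError on the
-- first access (pop(0) from an empty cache), while B would return 5 per access.
def Pre_solution (cacheSize : Int) (cities : List String) : Prop := 0 ≤ cacheSize ∨ cities = []
instance (cacheSize : Int) (cities : List String) : Decidable (Pre_solution cacheSize cities) := by unfold Pre_solution; infer_instance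
def pvWitness_solution : Int × List String := (2, ["Seoul", "SEOUL", "Busan", "Jeju", "seoul"])
def Spec_solution (cacheSize : Int) (cities : List String) (out : Int) : Prop := out = solution_alt cacheSize cities
instance (cacheSize : Int) (cities : List String) (out : Int) : Decidable (Spec_solution cacheSize cities out) := by unfold Spec_solution; infer_instance

-- ===== CLAIM (what is proved, stated in full; the proofs are below) =====
def Claim_equal_solution : Prop := ∀ (cacheSize : Int) (cities : List String), Dom_solution cacheSize cities → Pre_solution cacheSize cities → Spec_solution cacheSize cities (solution cacheSize cities)

-- ===== LEMMAS AND PROOFS =====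

-- proof-side view of A's loop body: the city already lowered (stepA city = stepA2 (lower city))

def stepA2 (cacheSize : Int) (st : Int × List String) (c : String) : Int × List String :=
  if ¬ st.2.contains c then
    if (st.2.length : Int) < cacheSize then (st.1 + 5, st.2 ++ [c])
    else
      match PySem.List.pop? st.2 0 with
      | some (_, rest) => (st.1 + 5, rest ++ [c])
      | none => (st.1 + 5, st.2 ++ [c])
  else
    match PySem.List.index? st.2 c with
    | some i =>
      match PySem.List.pop? st.2 (i : Int) with
      | some (_, rest) => (st.1 + 1, rest ++ [c])
      | none => (st.1 + 1, st.2 ++ [c])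
    | none => (st.1 + 1, st.2 ++ [c])

-- index of the last occurrence of x in a trace (what B's dict holds)
def lastOcc? : List String → String → Option Nat
  | [], _ => none
  | c :: t, x =>
    match lastOcc? t x with
    | some j => some (j + 1)
    | none => if c = x then some 0 else none

theorem lastOcc?_eq_none (p : List String) (x : String) :
    lastOcc? p x = none ↔ x ∉ p := by
  induction p with
  | nil => simp [lastOcc?]
  | cons c t ih =>
    simp only [lastOcc?, List.mem_cons]
    cases h : lastOcc? t x with
    | some j => simp [h] at ih ⊢; intro _; exact ih
    | none =>
      rw [h] at ih
      have hxt : x ∉ t := ih.mp rfl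
      by_cases hc : c = x <;> simp [hc, hxt] <;> tauto

theorem lastOcc?_append_single (p : List String) (c x : String) :
    lastOcc? (p ++ [c]) x = if c = x then some p.length else lastOcc? p x := by
  induction p with
  | nil => simp [lastOcc?]
  | cons a t ih =>
    simp only [List.cons_append, lastOcc?, ih, List.length_cons]
    by_cases hc : c = x <;> simp [hc]

theorem lastOcc?_spec (p : List String) (x : String) : ∀ (j : Nat), lastOcc? p x = some j →
    j < p.length ∧ p = p.take j ++ x :: p.drop (j + 1) ∧ x ∉ p.drop (j + 1) := by
  induction p with
  | nil => intro j h; simp [lastOcc?] at h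
  | cons c t ih =>
    intro j h
    simp only [lastOcc?] at h
    cases ht : lastOcc? t x with
    | some j' =>
      rw [ht] at h
      obtain ⟨h1, h2, h3⟩ := ih j' ht
      cases h
      refine ⟨by simpa using Nat.succ_lt_succ h1, ?_, ?_⟩
      · simpa using congrArg (c :: ·) h2
      · simpa using h3
    | none =>
      rw [ht] at h
      by_cases hc : c = x
      · simp [hc] at h
        subst h
        refine ⟨by simp, ?_, ?_⟩
        · simp [hc]
        · simpa using (lastOcc?_eq_none t x).mp ht
      · simp [hc] at h

-- most-recently-used order of the distinct elements of a trace (least recent first);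
-- A's cache after trace p is lastN cacheSize (mru p)
def mruStep (acc : List String) (c : String) : List String := acc.erase c ++ [c]
def mru (l : List String) : List String := l.foldl mruStep []
def lastN (k : Nat) (xs : List String) : List String := xs.drop (xs.length - k)

theorem mem_mruF (v : List String) : ∀ (acc : List String) (x : String),
    x ∈ v.foldl mruStep acc ↔ x ∈ acc ∨ x ∈ v := by
  induction v with
  | nil => simp
  | cons c t ih =>
    intro acc x
    rw [List.foldl_cons, ih]
    by_cases hx : x = c
    · simp [mruStep, hx]
    · simp [mruStep, List.mem_erase_of_ne hx, hx]

theorem nodup_mruF (v : List String) : ∀ (acc : List String), acc.Nodup → (v.foldl mruStep acc).Nodup := by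
  induction v with
  | nil => intro acc h; simpa using h
  | cons c t ih =>
    intro acc h
    rw [List.foldl_cons]
    refine ih _ ?_
    simp only [mruStep]
    refine List.Nodup.append (h.erase c) (List.nodup_singleton c) ?_
    intro a ha hb
    simp at hb
    subst hb
    exact h.not_mem_erase ha

theorem nodup_mru (v : List String) : (mru v).Nodup := nodup_mruF v [] List.nodup_nil

theorem mem_mru (v : List String) (x : String) : x ∈ mru v ↔ x ∈ v := by
  rw [mru, mem_mruF]; simp

theorem foldl_mruStep_eq (v : List String) : ∀ (L : List String), L.Nodup →
    v.foldl mruStep L = L.filter (fun x => !v.contains x) ++ mru v := by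
  induction v with
  | nil => intro L _; simp [mru]
  | cons c t ih =>
    intro L hL
    have hnd : (mruStep L c).Nodup := by
      simp only [mruStep]
      refine List.Nodup.append (hL.erase c) (List.nodup_singleton c) ?_
      intro a ha hb
      simp at hb; subst hb
      exact hL.not_mem_erase ha
    rw [List.foldl_cons, ih _ hnd]
    have hmru : mru (c :: t) = List.filter (fun x => !t.contains x) [c] ++ mru t := by
      rw [mru, List.foldl_cons]
      have : mruStep [] c = [c] := by simp [mruStep]
      rw [this, ih [c] (List.nodup_singleton c)]
    rw [hmru]
    simp only [mruStep, List.filter_append, List.append_assoc]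
    congr 1
    rw [hL.erase_eq_filter, List.filter_filter]
    apply List.filter_congr
    intro x _
    by_cases hx : x = c <;> simp [hx]

theorem mru_append_single (p : List String) (c : String) :
    mru (p ++ [c]) = (mru p).erase c ++ [c] := by
  simp [mru, List.foldl_append, mruStep]

theorem mru_decomp (p : List String) (x : String) (j : Nat) (h : lastOcc? p x = some j) :
    mru p = ((mru (p.take j)).erase x).filter (fun y => !(p.drop (j + 1)).contains y)
            ++ x :: mru (p.drop (j + 1)) := by
  obtain ⟨hj, hp, hv⟩ := lastOcc?_spec p x j h
  set u := p.take j with hu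
  set v := p.drop (j + 1) with hvv
  have hnd : (mruStep (mru u) x).Nodup := by
    simp only [mruStep]
    refine List.Nodup.append ((nodup_mru u).erase x) (List.nodup_singleton x) ?_
    intro a ha hb
    simp at hb; subst hb
    exact (nodup_mru u).not_mem_erase ha
  calc mru p = mru (u ++ x :: v) := by rw [← hp]
    _ = (x :: v).foldl mruStep (mru u) := by rw [mru, List.foldl_append]; rfl
    _ = v.foldl mruStep (mruStep (mru u) x) := by rw [List.foldl_cons]
    _ = (mruStep (mru u) x).filter (fun y => !v.contains y) ++ mru v := foldl_mruStep_eq v _ hnd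
    _ = _ := by
        simp only [mruStep, List.filter_append, List.append_assoc]
        congr 1
        have : List.filter (fun y => !v.contains y) [x] = [x] := by
          simp [hv]
        rw [this]
        rfl

theorem length_ofList_eq_length_mru (v : List String) :
    (PySem.Set.ofList v).length = (mru v).length := by
  have hperm : (PySem.Set.ofList v).Perm (mru v) := by
    rw [List.perm_ext_iff_of_nodup (PySem.Set.nodup_ofList v) (nodup_mru v)]
    intro a
    rw [PySem.Set.mem_ofList, mem_mru]
  exact hperm.length_eq

theorem mem_drop_of_nodup (w r : List String) (c : String) (h : (w ++ c :: r).Nodup) (m : Nat) :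
    c ∈ (w ++ c :: r).drop m ↔ m ≤ w.length := by
  constructor
  · intro hm
    by_contra hgt
    push_neg at hgt
    have h1 : (w ++ c :: r).drop m = (c :: r).drop (m - w.length) := by
      rw [List.drop_append, List.drop_eq_nil_of_le (by omega), List.nil_append]
    have h2 : (c :: r).drop (m - w.length) = r.drop (m - w.length - 1) := by
      have h3 : m - w.length = (m - w.length - 1) + 1 := by omega
      rw [h3]
      rfl
    rw [h1, h2] at hm
    have hcr : c ∉ r := by
      have := (List.nodup_append.mp h).2.1
      simpa using (List.nodup_cons.mp this).1
    exact hcr (List.mem_of_mem_drop hm)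
  · intro hm
    rw [List.drop_append_of_le_length hm]
    simp

theorem hit_iff (p : List String) (x : String) (k : Nat) :
    x ∈ lastN k (mru p) ↔ ∃ j, lastOcc? p x = some j ∧ (mru (p.drop (j + 1))).length < k := by
  cases h : lastOcc? p x with
  | none =>
    have hx : x ∉ p := (lastOcc?_eq_none p x).mp h
    simp only [lastN]
    constructor
    · intro hm
      exact False.elim (hx ((mem_mru p x).mp (List.mem_of_mem_drop hm)))
    · rintro ⟨j, hj, _⟩
      simp [h] at hj
  | some j =>
    have hdec := mru_decomp p x j h
    generalize hw : ((mru (p.take j)).erase x).filter (fun y => !(p.drop (j + 1)).contains y) = w at hdec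
    generalize hr : mru (p.drop (j + 1)) = r at hdec
    have hnd : (w ++ x :: r).Nodup := hdec ▸ nodup_mru p
    have hlen : (mru p).length = w.length + 1 + r.length := by
      rw [hdec]; simp; omega
    rw [lastN, hlen, hdec, mem_drop_of_nodup w r x hnd]
    constructor
    · intro hle
      exact ⟨j, rfl, by rw [hr]; omega⟩
    · rintro ⟨j', hj', hlt⟩
      cases hj'
      rw [hr] at hlt
      omega

theorem index_pop (cache : List String) (c : String) (hc : c ∈ cache) :
    ∃ i : Nat, PySem.List.index? cache c = some i ∧
      PySem.List.pop? cache (i : Int) = some (c, cache.erase c) := by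
  induction cache with
  | nil => cases hc
  | cons x t ih =>
    by_cases hx : x = c
    · refine ⟨0, ?_, ?_⟩
      · simp [PySem.List.index?, List.idxOf?_cons, hx]
      · simp [hx, List.erase_cons_head, PySem.List.pop?_zero_cons]
    · have hct : c ∈ t := by cases hc with | head => exact absurd rfl hx | tail _ h => exact h
      obtain ⟨i, hi, hp⟩ := ih hct
      refine ⟨i + 1, ?_, ?_⟩
      · simp [PySem.List.index?, List.idxOf?_cons, hx] at hi ⊢
        exact hi
      · simp [PySem.List.pop?, PySem.List.pyIdx?] at hp ⊢
        have hlt : i < t.length := by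
          by_cases h : i < t.length
          · exact h
          · simp [h] at hp
        simp only [hlt, if_true, Option.bind_some] at hp
        obtain ⟨hg, he⟩ : t[i]? = some c ∧ t.eraseIdx i = t.erase c := by
          cases hgi : t[i]? with
          | none => simp [hgi] at hp
          | some v =>
            simp [hgi] at hp
            exact ⟨by rw [hp.1], by rw [hp.2]⟩
        rw [if_pos (by omega), if_pos hlt]
        simp [hg, List.eraseIdx_cons_succ, he, List.erase_cons_tail, hx]

theorem stepA2_lastN (cs : Int) (hcs : 1 ≤ cs) (m : List String) (hm : m.Nodup) (ans : Int) (c : String) :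
    stepA2 cs (ans, lastN cs.toNat m) c
      = (ans + (if c ∈ lastN cs.toNat m then 1 else 5), lastN cs.toNat (m.erase c ++ [c])) := by
  have hk : 1 ≤ cs.toNat := by omega
  generalize hkdef : cs.toNat = k at *
  generalize hn : m.length = n
  have hsplit : m.take (n - k) ++ m.drop (n - k) = m := List.take_append_drop _ m
  have hal : (m.take (n - k)).length = n - k := by simp [hn]
  have hcl : (m.drop (n - k)).length = n - (n - k) := by simp [hn]
  generalize ha : m.take (n - k) = a at *
  generalize hcac : m.drop (n - k) = cache at *
  have hnd : (a ++ cache).Nodup := by rw [hsplit]; exact hm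
  have hdisj : ∀ x ∈ a, x ∈ cache → False := by
    intro x hx hx2
    exact (List.nodup_append.mp hnd).2.2 x hx x hx2 rfl
  have hlastN : lastN k m = cache := by rw [lastN, hn, hcac]
  by_cases hmem : c ∈ cache
  · -- hit: the new cache is cache.erase c ++ [c]
    have hcontains : cache.contains c = true := by simpa using hmem
    obtain ⟨i, hi, hp⟩ := index_pop cache c hmem
    have hca : c ∉ a := fun h => hdisj c h hmem
    have hcm : c ∈ m := by rw [← hsplit]; exact List.mem_append_right a hmem
    have hn1 : 1 ≤ n := by rw [← hn]; exact List.length_pos_of_mem hcm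
    have herase : m.erase c = a ++ cache.erase c := by
      rw [← hsplit, List.erase_append_right _ hca]
    have hlen : (m.erase c ++ [c]).length = n := by
      simp [List.length_erase_of_mem hcm, hn]; omega
    have hgoal2 : lastN k (m.erase c ++ [c]) = cache.erase c ++ [c] := by
      rw [lastN, hlen, herase, List.append_assoc, ← hal, List.drop_left]
    rw [hlastN]
    simp only [stepA2, hcontains, not_true_eq_false, if_false, hi, hp, hgoal2, hmem, if_true]
  · -- miss
    have hcontains : cache.contains c = false := by simpa using hmem
    rw [hlastN]
    by_cases hlt : cache.length < k
    · -- room: append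
      have hcachem : cache = m := by
        have : n - k = 0 := by omega
        rw [← hcac, this, List.drop_zero]
      have hcm : c ∉ m := by rw [← hcachem]; exact hmem
      have hgoal2 : lastN k (m.erase c ++ [c]) = cache ++ [c] := by
        rw [List.erase_of_not_mem hcm, lastN]
        have : (m ++ [c]).length - k = 0 := by simp [hn]; omega
        rw [this, List.drop_zero, hcachem]
      have hlt' : ((cache.length : Int) < cs) := by omega
      simp only [stepA2, hcontains, Bool.false_eq_true, not_false_eq_true, if_true, hlt', hgoal2,
        hmem, if_false]
    · -- full: evict the front
      have hck : cache.length = k := by omega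
      have hnk : k ≤ n := by omega
      obtain ⟨h0, t, hct⟩ : ∃ h0 t, cache = h0 :: t := by
        cases cache with
        | nil => simp at hck; omega
        | cons x y => exact ⟨x, y, rfl⟩
      have hpop : PySem.List.pop? cache 0 = some (h0, t) := by
        rw [hct]; exact PySem.List.pop?_zero_cons h0 t
      have hlt' : ¬ ((cache.length : Int) < cs) := by omega
      have hgoal2 : lastN k (m.erase c ++ [c]) = t ++ [c] := by
        by_cases hcm : c ∈ m
        · have hca : c ∈ a := by
            rcases List.mem_append.mp (hsplit ▸ hcm) with h | h
            · exact h
            · exact absurd h hmem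
          have hn1 : 1 ≤ a.length := List.length_pos_of_mem hca
          have herase : m.erase c = a.erase c ++ cache := by
            rw [← hsplit, List.erase_append_left _ hca]
          have hlen : (m.erase c ++ [c]).length = n := by
            simp [List.length_erase_of_mem hcm, hn]; omega
          rw [lastN, hlen, herase, List.append_assoc, List.drop_append,
            List.drop_eq_nil_of_le (by simp [List.length_erase_of_mem hca]; omega),
            List.nil_append]
          have : n - k - (a.erase c).length = 1 := by
            simp [List.length_erase_of_mem hca]; omega
          rw [this, hct, List.drop_one, List.cons_append, List.tail_cons]
        · have herase : m.erase c = a ++ cache := by rw [List.erase_of_not_mem hcm, hsplit]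
          have hlen : (m.erase c ++ [c]).length = n + 1 := by
            rw [herase, hsplit]; simp [hn]
          rw [lastN, hlen, herase, List.append_assoc, List.drop_append,
            List.drop_eq_nil_of_le (by omega), List.nil_append]
          have : n + 1 - k - a.length = 1 := by omega
          rw [this, hct, List.drop_one, List.cons_append, List.tail_cons]
      simp only [stepA2, hcontains, Bool.false_eq_true, not_false_eq_true, if_true, hlt',
        if_false, hpop, hgoal2, hmem]

theorem stepB_canon (cs : Int) (pref rest : List String) (c : String) (ans : Int)
    (d : PySem.Dict String Int)
    (hd : ∀ x, d.get? x = (lastOcc? pref x).map (fun j => (j : Int))) :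
    stepB cs (pref ++ c :: rest) (ans, d) ((pref.length : Int), c)
      = (ans + (if c ∈ lastN cs.toNat (mru pref) then 1 else 5), d.insert c (pref.length : Int)) := by
  simp only [stepB, hd c]
  cases h : lastOcc? pref c with
  | none =>
    have hno : c ∉ lastN cs.toNat (mru pref) := by
      rw [hit_iff]
      rintro ⟨j, hj, _⟩
      rw [h] at hj
      simp at hj
    simp [hno]
  | some j =>
    obtain ⟨hjlt, hpeq, hnotin⟩ := lastOcc?_spec pref c j h
    have hslice : PySem.List.slice (pref ++ c :: rest) (some ((j : Int) + 1)) (some (pref.length : Int))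
        = pref.drop (j + 1) := by
      have h1 : ((j : Int) + 1) = ((j + 1 : Nat) : Int) := by push_cast; ring
      rw [h1, PySem.List.slice_natCast, List.drop_append_of_le_length (by omega)]
      have h2 : (pref.drop (j + 1)).length = pref.length - (j + 1) := List.length_drop
      rw [← h2, List.take_left]
    have hmem_iff : c ∈ lastN cs.toNat (mru pref) ↔ (mru (pref.drop (j + 1))).length < cs.toNat := by
      rw [hit_iff]
      constructor
      · rintro ⟨j', hj', hl⟩
        rw [h] at hj'
        cases hj'
        exact hl
      · intro hl
        exact ⟨j, h, hl⟩
    have hlen := length_ofList_eq_length_mru (pref.drop (j + 1))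
    simp only [Option.map, hslice]
    by_cases hcond : ((PySem.Set.ofList (pref.drop (j + 1))).length : Int) < cs
    · have hmm : c ∈ lastN cs.toNat (mru pref) := hmem_iff.mpr (by omega)
      simp [hslice, hcond, hmm]
    · have hmm : c ∉ lastN cs.toNat (mru pref) := fun hmm => hcond (by
        have := hmem_iff.mp hmm; omega)
      simp [hslice, hcond, hmm]

theorem loop_eq (cs : Int) (hcs : 1 ≤ cs) (seq : List String) :
    ∀ (suffix pref : List String) (ans : Int) (d : PySem.Dict String Int),
      seq = pref ++ suffix →
      (∀ x, d.get? x = (lastOcc? pref x).map (fun j => (j : Int))) →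
      ((PySem.List.enumerate suffix (pref.length : Int)).foldl (stepB cs seq) (ans, d)).1
        = (suffix.foldl (stepA2 cs) (ans, lastN cs.toNat (mru pref))).1 := by
  intro suffix
  induction suffix with
  | nil => intro pref ans d _ _; rfl
  | cons c rest ih =>
    intro pref ans d hseq hd
    rw [PySem.List.enumerate_cons, List.foldl_cons, List.foldl_cons]
    rw [hseq, stepB_canon cs pref rest c ans d hd,
      stepA2_lastN cs hcs (mru pref) (nodup_mru pref) ans c, ← mru_append_single]
    have hseq' : seq = (pref ++ [c]) ++ rest := by simp [hseq]
    have hd' : ∀ x, (d.insert c (pref.length : Int)).get? x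
        = (lastOcc? (pref ++ [c]) x).map (fun j => (j : Int)) := by
      intro x
      rw [PySem.Dict.get?_insert, lastOcc?_append_single]
      by_cases hx : x = c
      · simp [hx]
      · simp [hx, hd x, Ne.symm hx]
    have hlen : ((pref.length : Int) + 1) = (((pref ++ [c]).length : Nat) : Int) := by
      simp
    rw [hlen, ← hseq]
    exact ih (pref ++ [c]) _ _ hseq' hd'

theorem stepB_nonpos (cs : Int) (hcs : cs ≤ 0) (seq : List String) :
    ∀ (es : List (Int × String)) (ans : Int) (d : PySem.Dict String Int),
      (es.foldl (stepB cs seq) (ans, d)).1 = ans + 5 * es.length := by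
  intro es
  induction es with
  | nil => intro ans d; simp
  | cons p rest ih =>
    intro ans d
    rw [List.foldl_cons]
    have hstep : (stepB cs seq (ans, d) p).1 = ans + 5 := by
      simp only [stepB]
      cases d.get? p.2 with
      | none => rfl
      | some j =>
        have : ¬ ((PySem.Set.ofList (PySem.List.slice seq (some (j + 1)) (some p.1))).length : Int) < cs := by
          omega
        simp [this]
    have : stepB cs seq (ans, d) p = ((ans + 5 : Int), (stepB cs seq (ans, d) p).2) := by
      rw [← hstep]
    rw [this, ih]
    simp [List.length_cons]
    push_cast
    ring

theorem solution_eq : ∀ (cacheSize : Int) (cities : List String), (0 ≤ cacheSize ∨ cities = []) →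
    solution cacheSize cities = solution_alt cacheSize cities := by
  intro cs cities hpre
  by_cases h0 : cs = 0
  · subst h0
    simp only [solution, solution_alt, beq_self_eq_true, if_true]
    rw [stepB_nonpos 0 le_rfl _ _ 0 PySem.Dict.empty]
    simp [PySem.List.length_enumerate]
    ring
  · rcases hpre with hcs | hnil
    · have hcs1 : 1 ≤ cs := by omega
      simp only [solution, solution_alt, beq_iff_eq, h0, if_false]
      have hA : cities.foldl (stepA cs) ((0 : Int), ([] : List String))
          = (cities.map PySem.Str.lower).foldl (stepA2 cs) ((0 : Int), ([] : List String)) := by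
        rw [List.foldl_map]
        rfl
      rw [hA]
      have := loop_eq cs hcs1 (cities.map PySem.Str.lower) (cities.map PySem.Str.lower) [] 0 PySem.Dict.empty (by simp) (by intro x; rfl)
      simpa [lastN, mru] using this.symm
    · subst hnil
      simp [solution, solution_alt, h0, PySem.List.enumerate]

-- ===== VERDICT (by name: the statement is the Claim_ definition above) =====
theorem solution_spec : Claim_equal_solution := by
  intro cacheSize cities _ hpre
  unfold Spec_solution
  exact solution_eq cacheSize cities hpre
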